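-- pv_equiv track=rewrite | github.com/YufeiHu/Online-Accessment | Amazon/OA2/coding/find_substrings_with_k_distinct_letters.py | subStringsKDist
-- ===== SOURCE A (Python) =====
-- def is_valid(status):
--     for cnt in status:
--         if cnt != 0 and cnt != 1:
--             return False
--     return True
--
-- def subStringsKDist(string, k):
--     if len(string) < k:
--         return list()
--
--     # initialize status, O(1)
--     ans = set()
--     status = [0] * 26
--     for i in range(k):
--         index = ord(string[i]) - ord('a')
--         status[index] += 1
--     if is_valid(status):
--         ans.add(string[0: k])
--
--     # scan the string with a sliding window to update ans, O(n)
--     l = 0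
--     while l + k < len(string):
--         index = ord(string[l]) - ord('a')
--         status[index] -= 1
--         index = ord(string[l + k]) - ord('a')
--         status[index] += 1
--         if is_valid(status):
--             ans.add(string[l + 1: l + 1 + k])
--         l += 1
--
--     return list(ans)
-- ===== SOURCE B (Python) =====
-- def subStringsKDist(string, k):
--     result = set()
--     for i in range(len(string) - k + 1):
--         w = string[i:i + k]
--         if len(set(w)) == k:
--             result.add(w)
--     return list(result)
-- ===== Notes on version B (the rewrite author's own statement) =====
-- stated objective: simpler
-- what changed: B drops the incrementally-updated 26-slot count array and its validity scan entirely: it loops once over the window start positions and adds the window when its character set has size k (distinctness recomputed per window), instead of A's sliding-window status bookkeeping.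
-- outside the precondition, e.g. on subStringsKDist('Ga', 2): A returns [], B returns ['Ga']
import Mathlib
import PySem

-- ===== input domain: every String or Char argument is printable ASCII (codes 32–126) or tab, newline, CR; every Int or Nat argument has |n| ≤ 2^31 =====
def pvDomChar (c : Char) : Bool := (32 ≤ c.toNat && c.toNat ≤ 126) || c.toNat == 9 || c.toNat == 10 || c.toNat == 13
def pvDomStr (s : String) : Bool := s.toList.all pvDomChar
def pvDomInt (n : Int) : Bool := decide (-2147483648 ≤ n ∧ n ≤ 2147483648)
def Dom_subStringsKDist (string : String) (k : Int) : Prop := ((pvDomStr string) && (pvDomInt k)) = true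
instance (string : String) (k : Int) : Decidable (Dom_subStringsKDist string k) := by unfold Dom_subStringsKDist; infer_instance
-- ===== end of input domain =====

-- B replaces A's sliding 26-slot count array with a per-window distinctness check (simpler decomposition, same results).

-- ===== PORT A =====
-- Python is_valid(status)
def pvIsValid : List Int → Bool
  | [] => true
  | cnt :: rest => if cnt ≠ 0 ∧ cnt ≠ 1 then false else pvIsValid rest

-- Python 'status[i] += d' with negative indexing; where Python would raise IndexError
-- (index outside [-len, len), excluded by Pre_) this returns status unchanged.
def pvBump (st : List Int) (i d : Int) : List Int :=
  let j := if i < 0 then i + (st.length : Int) else i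
  if 0 ≤ j ∧ j < (st.length : Int) then st.set j.toNat (st.getD j.toNat 0 + d) else st

-- Python ord(string[i]); out of range Python raises IndexError (excluded by Pre_), the default is arbitrary.
def pvOrdAt (cs : List Char) (i : Int) : Int := ((PySem.List.pyGetD cs i 'a').toNat : Int)

-- the 'while l + k < len(string)' loop; fuel = exact number of iterations, the guard is kept as in Python
def pvLoopA (cs : List Char) (k : Int) : Nat → Int → List Int → PySem.Set String → PySem.Set String
  | 0, _, _, ans => ans
  | fuel + 1, l, status, ans =>
    if l + k < (cs.length : Int) then
      let status1 := pvBump status (pvOrdAt cs l - 97) (-1)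
      let status2 := pvBump status1 (pvOrdAt cs (l + k) - 97) 1
      let ans1 := if pvIsValid status2 then
          PySem.Set.add ans (String.ofList (PySem.List.slice cs (some (l + 1)) (some (l + 1 + k))))
        else ans
      pvLoopA cs k fuel (l + 1) status2 ans1
    else ans

def subStringsKDist (string : String) (k : Int) : List String :=
  let cs := string.toList
  if (cs.length : Int) < k then []
  else
    let status := (PySem.List.pyRange 0 k).foldl
      (fun st i => pvBump st (pvOrdAt cs i - 97) 1) (List.replicate 26 0)
    let ans : PySem.Set String :=
      if pvIsValid status then
        PySem.Set.add PySem.Set.empty (String.ofList (PySem.List.slice cs (some 0) (some k)))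
      else PySem.Set.empty
    pvLoopA cs k (((cs.length : Int) - k).toNat) 0 status ans

-- ===== PORT B =====
def subStringsKDist_alt (string : String) (k : Int) : List String :=
  let cs := string.toList
  (PySem.List.pyRange 0 ((cs.length : Int) - k + 1)).foldl
    (fun acc i =>
      let w := PySem.List.slice cs (some i) (some (i + k))
      if PySem.Set.len (PySem.Set.ofList w) = k then PySem.Set.add acc (String.ofList w) else acc)
    PySem.Set.empty

-- ===== PRECONDITION & SPEC =====
-- Pre_ excludes k < 0, on which A always raises IndexError, and (when len(string) ≥ k, so that A
-- indexes the string) strings with any character outside 'a'..'z': A raises IndexError for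
-- characters outside 'G'..'z', and for 'G'..'`' A's negative-index arithmetic conflates them with
-- the lowercase letter 26 code points up — a value outside the lowercase-letters domain this
-- function is written for, on which neither behaviour is specified.
def Pre_subStringsKDist (string : String) (k : Int) : Prop :=
  0 ≤ k ∧ ((string.toList.length : Int) < k ∨
    string.toList.all (fun c => decide (97 ≤ c.toNat) && decide (c.toNat ≤ 122)) = true)
instance (string : String) (k : Int) : Decidable (Pre_subStringsKDist string k) := by
  unfold Pre_subStringsKDist; infer_instance
def pvWitness_subStringsKDist : String × Int := ("abc", 2)

def Spec_subStringsKDist (string : String) (k : Int) (out : List String) : Prop := out = subStringsKDist_alt string k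
instance (string : String) (k : Int) (out : List String) : Decidable (Spec_subStringsKDist string k out) := by unfold Spec_subStringsKDist; infer_instance

-- ===== CLAIM (what is proved, stated in full; the proofs are below) =====
def Claim_equal_subStringsKDist : Prop := ∀ (string : String) (k : Int), Dom_subStringsKDist string k → Pre_subStringsKDist string k → Spec_subStringsKDist string k (subStringsKDist string k)

-- ===== LEMMAS AND PROOFS =====

-- abbreviations used only by the proofs
def pvLower (c : Char) : Prop := 97 ≤ c.toNat ∧ c.toNat ≤ 122

def pvBumpC (st : List Int) (c : Char) : List Int := pvBump st ((c.toNat : Int) - 97) 1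

def pvCnt (w : List Char) : List Int := w.foldl pvBumpC (List.replicate 26 0)

lemma pvBump_length (st : List Int) (i d : Int) : (pvBump st i d).length = st.length := by
  unfold pvBump; dsimp only; split_ifs <;> simp

lemma pvBump_in_range (st : List Int) (i d : Int) (h0 : 0 ≤ i) (h1 : i < (st.length : Int)) :
    pvBump st i d = st.set i.toNat (st.getD i.toNat 0 + d) := by
  unfold pvBump; dsimp only
  rw [if_neg (show ¬ i < 0 by omega)]
  rw [if_pos ⟨h0, h1⟩]

lemma pvBump_comm (st : List Int) (i j d e : Int)
    (hi0 : 0 ≤ i) (hi1 : i < (st.length : Int)) (hj0 : 0 ≤ j) (hj1 : j < (st.length : Int)) :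
    pvBump (pvBump st i d) j e = pvBump (pvBump st j e) i d := by
  have hiN : i.toNat < st.length := by omega
  have hjN : j.toNat < st.length := by omega
  rw [pvBump_in_range st i d hi0 hi1, pvBump_in_range st j e hj0 hj1,
      pvBump_in_range _ j e hj0 (by simpa using hj1),
      pvBump_in_range _ i d hi0 (by simpa using hi1)]
  by_cases hij : i.toNat = j.toNat
  · have hij' : i = j := by omega
    subst hij'
    rw [List.set_set, List.set_set]
    have gset : ∀ v : ℤ, (st.set i.toNat v).getD i.toNat 0 = v := by
      intro v
      rw [List.getD_eq_getElem _ _ (by simpa using hiN), List.getElem_set_self]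
    rw [gset, gset]
    congr 1
    ring
  · have gj : (st.set i.toNat (st.getD i.toNat 0 + d)).getD j.toNat 0 = st.getD j.toNat 0 := by
      rw [List.getD_eq_getElem _ _ (by simpa using hjN),
          List.getElem_set_ne hij, List.getD_eq_getElem _ _ hjN]
    have gi : (st.set j.toNat (st.getD j.toNat 0 + e)).getD i.toNat 0 = st.getD i.toNat 0 := by
      rw [List.getD_eq_getElem _ _ (by simpa using hiN),
          List.getElem_set_ne (Ne.symm hij), List.getD_eq_getElem _ _ hiN]
    rw [gj, gi, List.set_comm _ _ hij]

lemma pvBump_cancel (st : List Int) (i d : Int) (h0 : 0 ≤ i) (h1 : i < (st.length : Int)) :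
    pvBump (pvBump st i d) i (-d) = st := by
  have hiN : i.toNat < st.length := by omega
  rw [pvBump_in_range st i d h0 h1,
      pvBump_in_range _ i (-d) h0 (by simpa using h1)]
  have g : (st.set i.toNat (st.getD i.toNat 0 + d)).getD i.toNat 0 = st.getD i.toNat 0 + d := by
    rw [List.getD_eq_getElem _ _ (by simpa using hiN), List.getElem_set_self]
  rw [g, List.set_set]
  have : st.getD i.toNat 0 + d + -d = st.getD i.toNat 0 := by ring
  rw [this, List.getD_eq_getElem _ _ hiN, List.set_getElem_self]

lemma pvFoldl_bumpc_length (w : List Char) (st : List Int) :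
    (w.foldl pvBumpC st).length = st.length := by
  induction w generalizing st with
  | nil => rfl
  | cons a t ih => simp only [List.foldl_cons]; rw [ih, pvBumpC, pvBump_length]

lemma pvFoldl_bumpc_bump (w : List Char) (st : List Int) (i d : Int)
    (hst : st.length = 26) (hw : ∀ c ∈ w, pvLower c) (hi0 : 0 ≤ i) (hi1 : i < 26) :
    w.foldl pvBumpC (pvBump st i d) = pvBump (w.foldl pvBumpC st) i d := by
  induction w generalizing st with
  | nil => rfl
  | cons a t ih =>
    have hla := hw a (by simp)
    have hcomm : pvBumpC (pvBump st i d) a = pvBump (pvBumpC st a) i d := by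
      rw [pvBumpC, pvBumpC]
      exact pvBump_comm st i _ d 1 hi0 (by omega) (by rcases hla with ⟨h1, h2⟩; omega)
        (by rcases hla with ⟨h1, h2⟩; rw [hst]; omega)
    simp only [List.foldl_cons]
    rw [hcomm, ih _ (by rw [pvBumpC, pvBump_length]; exact hst) (fun c hc => hw c (by simp [hc]))]

lemma pvCnt_length (w : List Char) : (pvCnt w).length = 26 := by
  rw [pvCnt, pvFoldl_bumpc_length]; simp

lemma pvCnt_cons (c : Char) (m : List Char) (hc : pvLower c) (hm : ∀ x ∈ m, pvLower x) :
    pvCnt (c :: m) = pvBump (pvCnt m) ((c.toNat : Int) - 97) 1 := by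
  rw [pvCnt, List.foldl_cons, pvBumpC, pvCnt]
  exact pvFoldl_bumpc_bump m _ _ 1 (by simp) hm (by rcases hc with ⟨h1, h2⟩; omega)
    (by rcases hc with ⟨h1, h2⟩; omega)

lemma pvCnt_snoc (m : List Char) (b : Char) :
    pvCnt (m ++ [b]) = pvBump (pvCnt m) ((b.toNat : Int) - 97) 1 := by
  rw [pvCnt, pvCnt, List.foldl_append]; rfl

lemma pvCharToNatInj (a c : Char) (h : a.toNat = c.toNat) : a = c :=
  Char.ext (UInt32.toNat_inj.mp h)

-- slot content: counts
lemma pvFoldl_bumpc_getD_count (w : List Char) (c : Char) (hc : pvLower c) :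
    ∀ st : List Int, st.length = 26 → (∀ x ∈ w, pvLower x) →
      (w.foldl pvBumpC st).getD (c.toNat - 97) 0 = st.getD (c.toNat - 97) 0 + (w.count c : Int) := by
  induction w with
  | nil => intro st _ _; simp
  | cons a t ih =>
    intro st hst hw
    have hla := hw a (by simp)
    have hlen : (pvBumpC st a).length = 26 := by rw [pvBumpC, pvBump_length]; exact hst
    simp only [List.foldl_cons]
    rw [ih _ hlen (fun x hx => hw x (by simp [hx]))]
    by_cases hac : a = c
    · subst hac
      have hbump : (pvBumpC st a).getD (a.toNat - 97) 0 = st.getD (a.toNat - 97) 0 + 1 := by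
        rw [pvBumpC, pvBump_in_range st _ 1 (by rcases hla with ⟨h1, h2⟩; omega) (by rw [hst]; rcases hla with ⟨h1, h2⟩; omega)]
        have htn : (((a.toNat : Int)) - 97).toNat = a.toNat - 97 := by omega
        rw [htn, List.getD_eq_getElem _ _
              (by rw [List.length_set]; rcases hla with ⟨h1, h2⟩; omega),
            List.getElem_set_self]
      rw [hbump]
      have hcnt : List.count a (a :: t) = List.count a t + 1 := by simp
      rw [hcnt]
      push_cast
      ring
    · have hslot : a.toNat - 97 ≠ c.toNat - 97 := by
        intro h
        rcases hla with ⟨h1, _⟩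
        rcases hc with ⟨h3, _⟩
        exact hac (pvCharToNatInj a c (by omega))
      have hbump : (pvBumpC st a).getD (c.toNat - 97) 0 = st.getD (c.toNat - 97) 0 := by
        rw [pvBumpC, pvBump_in_range st _ 1 (by rcases hla with ⟨h1, h2⟩; omega) (by rw [hst]; rcases hla with ⟨h1, h2⟩; omega)]
        have htn : (((a.toNat : Int)) - 97).toNat = a.toNat - 97 := by omega
        have hcN : c.toNat - 97 < st.length := by rcases hc with ⟨h3, h4⟩; omega
        rw [htn, List.getD_eq_getElem _ _ (by rw [List.length_set]; exact hcN),
            List.getElem_set_ne hslot, List.getD_eq_getElem _ _ hcN]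
      rw [hbump]
      have hcnt : List.count c (a :: t) = List.count c t := by
        simp [hac]
      rw [hcnt]

lemma pvFoldl_bumpc_getD_miss (w : List Char) (j : Nat) (hj26 : j < 26) :
    ∀ st : List Int, st.length = 26 → (∀ x ∈ w, pvLower x) → (∀ x ∈ w, x.toNat - 97 ≠ j) →
      (w.foldl pvBumpC st).getD j 0 = st.getD j 0 := by
  induction w with
  | nil => intro st _ _ _; rfl
  | cons a t ih =>
    intro st hst hw hmiss
    have hla := hw a (by simp)
    have hlen : (pvBumpC st a).length = 26 := by rw [pvBumpC, pvBump_length]; exact hst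
    simp only [List.foldl_cons]
    rw [ih _ hlen (fun x hx => hw x (by simp [hx])) (fun x hx => hmiss x (by simp [hx]))]
    have hja : a.toNat - 97 ≠ j := hmiss a (by simp)
    rw [pvBumpC, pvBump_in_range st _ 1 (by rcases hla with ⟨h1, h2⟩; omega) (by rw [hst]; rcases hla with ⟨h1, h2⟩; omega)]
    have htn : (((a.toNat : Int)) - 97).toNat = a.toNat - 97 := by omega
    rw [htn]
    have hset : (st.set (a.toNat - 97) (st.getD (a.toNat - 97) 0 + 1)).getD j 0 = st.getD j 0 := by
      rw [List.getD_eq_getElem _ _ (show j < (st.set (a.toNat - 97) (st.getD (a.toNat - 97) 0 + 1)).length by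
            rw [List.length_set, hst]; omega),
          List.getElem_set_ne hja, List.getD_eq_getElem _ _ (show j < st.length by rw [hst]; omega)]
    rw [hset]

lemma pvIsValid_iff (st : List Int) : pvIsValid st = true ↔ ∀ x ∈ st, x = 0 ∨ x = 1 := by
  induction st with
  | nil => simp [pvIsValid]
  | cons a t ih =>
    unfold pvIsValid
    by_cases h : a ≠ 0 ∧ a ≠ 1
    · rw [if_pos h]
      simp only [Bool.false_eq_true, false_iff]
      intro hall
      have := hall a (by simp)
      omega
    · rw [if_neg h, ih]
      constructor
      · intro ht x hx
        rcases List.mem_cons.mp hx with rfl | hx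
        · omega
        · exact ht x hx
      · intro hall x hx
        exact hall x (List.mem_cons_of_mem _ hx)

lemma pvValid_cnt_iff (w : List Char) (hw : ∀ x ∈ w, pvLower x) :
    pvIsValid (pvCnt w) = true ↔ w.Nodup := by
  have hrep : ∀ j : Nat, j < 26 → (List.replicate 26 (0 : Int)).getD j 0 = 0 := by
    intro j hj
    rw [List.getD_eq_getElem _ _ (by simpa using hj), List.getElem_replicate]
  constructor
  · intro hv
    rw [List.nodup_iff_count_le_one]
    intro c
    by_cases hcmem : c ∈ w
    · have hlc := hw c hcmem
      have hcount := pvFoldl_bumpc_getD_count w c hlc (List.replicate 26 0) (by simp) hw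
      have hj : c.toNat - 97 < 26 := by rcases hlc with ⟨h1, h2⟩; omega
      have hmem : (pvCnt w).getD (c.toNat - 97) 0 ∈ pvCnt w := by
        rw [List.getD_eq_getElem _ _ (by rw [pvCnt_length]; omega)]
        exact List.getElem_mem _
      have hval := (pvIsValid_iff (pvCnt w)).mp hv _ hmem
      rw [show pvCnt w = w.foldl pvBumpC (List.replicate 26 0) from rfl] at hval hmem
      rw [hcount, hrep _ hj] at hval
      omega
    · rw [List.count_eq_zero_of_not_mem hcmem]
      omega
  · intro hnd
    rw [pvIsValid_iff]
    intro x hx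
    obtain ⟨j, hj, rfl⟩ := List.mem_iff_getElem.mp hx
    have hj26 : j < 26 := by have := pvCnt_length w; omega
    have hgd : (pvCnt w)[j] = (pvCnt w).getD j 0 := by
      rw [List.getD_eq_getElem _ _ hj]
    by_cases hex : ∃ c ∈ w, c.toNat - 97 = j
    · obtain ⟨c, hcmem, hcj⟩ := hex
      have hlc := hw c hcmem
      have hcount := pvFoldl_bumpc_getD_count w c hlc (List.replicate 26 0) (by simp) hw
      have h1 : List.count c w = 1 := by
        have hle := List.nodup_iff_count_le_one.mp hnd c
        have hge : 0 < List.count c w := List.count_pos_iff.mpr hcmem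
        omega
      right
      rw [hgd]
      rw [show pvCnt w = w.foldl pvBumpC (List.replicate 26 0) from rfl, ← hcj]
      rw [hcount, hrep _ (by omega), h1]
      norm_num
    · simp only [not_exists, not_and] at hex
      have hmiss := pvFoldl_bumpc_getD_miss w j hj26 (List.replicate 26 0) (by simp) hw hex
      left
      rw [hgd, show pvCnt w = w.foldl pvBumpC (List.replicate 26 0) from rfl, hmiss, hrep _ hj26]

-- B's per-window test
lemma pvFoldlAdd_of_nodup {α : Type} [BEq α] [LawfulBEq α] (w : List α) :
    ∀ acc : List α, (∀ x ∈ w, x ∉ acc) → w.Nodup → w.foldl PySem.Set.add acc = acc ++ w := by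
  induction w with
  | nil => intro acc _ _; simp
  | cons a t ih =>
    intro acc hdis hnd
    simp only [List.foldl_cons]
    rw [PySem.Set.add_of_not_mem (hdis a (by simp))]
    rw [ih (acc ++ [a])
        (by
          intro x hx hmem
          rcases List.mem_append.mp hmem with hacc | hone
          · exact hdis x (List.mem_cons_of_mem _ hx) hacc
          · rcases List.mem_singleton.mp hone with rfl
            exact (List.nodup_cons.mp hnd).1 hx)
        (List.Nodup.of_cons hnd)]
    simp



lemma pvSetLen_iff (w : List Char) :
    ((PySem.Set.ofList w).length = w.length) ↔ w.Nodup := by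
  constructor
  · intro hlen
    have hfin : (PySem.Set.ofList w).toFinset = w.toFinset := by
      ext x
      simp [List.mem_toFinset, PySem.Set.mem_ofList]
    have h1 : (PySem.Set.ofList w).toFinset.card = (PySem.Set.ofList w).length :=
      List.toFinset_card_of_nodup (PySem.Set.nodup_ofList w)
    have h2 : w.toFinset.card = w.length := by rw [← hfin, h1, hlen]
    have h3 : (↑w : Multiset Char).toFinset.card = Multiset.card (↑w : Multiset Char) := by
      rwa [List.toFinset_coe, Multiset.coe_card]
    simpa using Multiset.toFinset_card_eq_card_iff_nodup.mp h3
  · intro hnd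
    rw [PySem.Set.ofList_eq_foldl, pvFoldlAdd_of_nodup w [] (by simp) hnd]
    simp

-- slice facts
lemma pvSlice_cons (cs : List Char) (a b : Int) (h0 : 0 ≤ a) (h1 : a < b) (h2 : b ≤ (cs.length : Int)) :
    PySem.List.slice cs (some a) (some b) =
      cs.getD a.toNat 'a' :: PySem.List.slice cs (some (a + 1)) (some b) := by
  have haN : a.toNat < cs.length := by omega
  rw [PySem.List.slice_of_nonneg cs h0 (by omega) (by omega) h2,
      PySem.List.slice_of_nonneg cs (by omega) (by omega) (by omega) h2]
  rw [List.drop_eq_getElem_cons haN]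
  rw [show b.toNat - a.toNat = (b.toNat - (a + 1).toNat) + 1 by omega, List.take_succ_cons]
  congr 1
  · rw [List.getD_eq_getElem _ _ haN]
  · congr 2
    omega

lemma pvSlice_snoc (cs : List Char) (a b : Int) (h0 : 0 ≤ a) (h1 : a ≤ b) (h2 : b < (cs.length : Int)) :
    PySem.List.slice cs (some a) (some (b + 1)) =
      PySem.List.slice cs (some a) (some b) ++ [cs.getD b.toNat 'a'] := by
  have hbN : b.toNat < cs.length := by omega
  rw [PySem.List.slice_of_nonneg cs h0 (by omega) (by omega) (by omega),
      PySem.List.slice_of_nonneg cs h0 (by omega) (by omega) (by omega)]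
  rw [show (b + 1).toNat - a.toNat = (b.toNat - a.toNat) + 1 by omega, List.take_add_one]
  congr 1
  rw [List.getElem?_eq_getElem (by rw [List.length_drop]; omega)]
  rw [List.getElem_drop]
  simp only [Option.toList_some]
  congr 1
  rw [List.getD_eq_getElem _ _ hbN]
  simp only [show a.toNat + (b.toNat - a.toNat) = b.toNat by omega]

lemma pvSlice_len (cs : List Char) (a b : Int) (h0 : 0 ≤ a) (h1 : a ≤ b) (h2 : b ≤ (cs.length : Int)) :
    ((PySem.List.slice cs (some a) (some b)).length : Int) = b - a := by
  rw [PySem.List.slice_of_nonneg cs h0 (by omega) (by omega) h2]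
  simp only [List.length_take, List.length_drop]
  omega

lemma pvOrdAt_eq (cs : List Char) (i : Int) (h0 : 0 ≤ i) (h1 : i < (cs.length : Int)) :
    pvOrdAt cs i = ((cs.getD i.toNat 'a').toNat : Int) := by
  rw [pvOrdAt, PySem.List.pyGetD_eq_getElem cs 'a' h0 h1,
      List.getD_eq_getElem _ _ (by omega)]

-- the initial fold over range(k) computes the counts of the slice
lemma pvInit_fold (cs : List Char) (hw : ∀ x ∈ cs, pvLower x) :
    ∀ (n : Nat) (a b : Int) (st : List Int), st.length = 26 → b - a = n → 0 ≤ a → a ≤ b → b ≤ (cs.length : Int) →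
      (PySem.List.pyRange a b).foldl (fun st i => pvBump st (pvOrdAt cs i - 97) 1) st =
        (PySem.List.slice cs (some a) (some b)).foldl pvBumpC st := by
  intro n
  induction n with
  | zero =>
    intro a b st hst hba h0 h1 h2
    rw [PySem.List.pyRange_one_eq_nil (by omega)]
    have hempty : PySem.List.slice cs (some a) (some b) = [] := by
      rw [PySem.List.slice_of_nonneg cs h0 (by omega) (by omega) h2,
          show b.toNat - a.toNat = 0 by omega, List.take_zero]
    rw [hempty]
    simp only [List.foldl_nil]
  | succ n ih =>
    intro a b st hst hba h0 h1 h2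
    rw [PySem.List.pyRange_one_cons (by omega), pvSlice_cons cs a b h0 (by omega) h2]
    simp only [List.foldl_cons]
    have hacc : pvBump st (pvOrdAt cs a - 97) 1 = pvBumpC st (cs.getD a.toNat 'a') := by
      rw [pvBumpC, pvOrdAt_eq cs a h0 (by omega)]
    rw [hacc]
    exact ih (a + 1) b _ (by rw [pvBumpC, pvBump_length]; exact hst) (by omega) (by omega)
      (by omega) h2

-- the sliding-window invariant step
lemma pvStep (cs : List Char) (k l : Int) (hw : ∀ x ∈ cs, pvLower x)
    (hk : 0 ≤ k) (hl : 0 ≤ l) (hlt : l + k < (cs.length : Int)) :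
    pvBump (pvBump (pvCnt (PySem.List.slice cs (some l) (some (l + k)))) (pvOrdAt cs l - 97) (-1))
        (pvOrdAt cs (l + k) - 97) 1 =
      pvCnt (PySem.List.slice cs (some (l + 1)) (some (l + 1 + k))) := by
  have hlN : l < (cs.length : Int) := by omega
  have hcl : pvLower (cs.getD l.toNat 'a') := hw _ (by
    rw [List.getD_eq_getElem _ _ (by omega)]
    exact List.getElem_mem _)
  have hclk : pvLower (cs.getD (l + k).toNat 'a') := hw _ (by
    rw [List.getD_eq_getElem _ _ (by omega)]
    exact List.getElem_mem _)
  by_cases hk0 : k = 0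
  · subst hk0
    have hsl : ∀ m : Int, 0 ≤ m → m ≤ (cs.length : Int) →
        PySem.List.slice cs (some m) (some (m + 0)) = [] := by
      intro m h0' h1'
      rw [PySem.List.slice_of_nonneg cs h0' (by omega) (by omega) (by omega),
          show (m + 0).toNat - m.toNat = 0 by omega, List.take_zero]
    rw [hsl l hl (by omega), hsl (l + 1) (by omega) (by omega)]
    rw [pvOrdAt_eq cs l hl hlN, show l + (0 : Int) = l from add_zero l,
        pvOrdAt_eq cs l hl hlN]
    have hrange : 0 ≤ ((cs.getD l.toNat 'a').toNat : Int) - 97 ∧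
        ((cs.getD l.toNat 'a').toNat : Int) - 97 < ((pvCnt []).length : Int) := by
      rw [pvCnt_length]
      rcases hcl with ⟨h1, h2⟩
      constructor <;> omega
    simpa using pvBump_cancel (pvCnt []) _ (-1) hrange.1 hrange.2
  · have hwin : PySem.List.slice cs (some l) (some (l + k)) =
        cs.getD l.toNat 'a' :: PySem.List.slice cs (some (l + 1)) (some (l + k)) :=
      pvSlice_cons cs l (l + k) hl (by omega) (by omega)
    have hwin2 : PySem.List.slice cs (some (l + 1)) (some (l + 1 + k)) =
        PySem.List.slice cs (some (l + 1)) (some (l + k)) ++ [cs.getD (l + k).toNat 'a'] := by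
      rw [show l + 1 + k = (l + k) + 1 by ring]
      exact pvSlice_snoc cs (l + 1) (l + k) (by omega) (by omega) hlt
    have hmlow : ∀ x ∈ PySem.List.slice cs (some (l + 1)) (some (l + k)), pvLower x :=
      fun x hx => hw x (PySem.List.mem_of_mem_slice cs _ _ hx)
    rw [hwin, hwin2, pvCnt_cons _ _ hcl hmlow, pvCnt_snoc]
    rw [pvOrdAt_eq cs l hl hlN, pvOrdAt_eq cs (l + k) (by omega) hlt]
    congr 1
    have hrange : 0 ≤ ((cs.getD l.toNat 'a').toNat : Int) - 97 ∧
        ((cs.getD l.toNat 'a').toNat : Int) - 97 <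
          ((pvCnt (PySem.List.slice cs (some (l + 1)) (some (l + k)))).length : Int) := by
      rw [pvCnt_length]
      rcases hcl with ⟨h1, h2⟩
      constructor <;> omega
    exact pvBump_cancel _ _ 1 hrange.1 hrange.2

-- the main loop, related to B's fold over the remaining window starts
lemma pvLoop_eq (cs : List Char) (k : Int) (hw : ∀ x ∈ cs, pvLower x) (hk : 0 ≤ k)
    (hkn : k ≤ (cs.length : Int)) :
    ∀ (fuel : Nat) (l : Int) (ans : PySem.Set String), 0 ≤ l →
      fuel = ((cs.length : Int) - k - l).toNat →
      pvLoopA cs k fuel l (pvCnt (PySem.List.slice cs (some l) (some (l + k)))) ans =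
        (PySem.List.pyRange (l + 1) ((cs.length : Int) - k + 1)).foldl
          (fun acc i =>
            let w := PySem.List.slice cs (some i) (some (i + k))
            if PySem.Set.len (PySem.Set.ofList w) = k then PySem.Set.add acc (String.ofList w) else acc)
          ans := by
  intro fuel
  induction fuel with
  | zero =>
    intro l ans hl hfuel
    rw [PySem.List.pyRange_one_eq_nil (by omega)]
    rfl
  | succ fuel ih =>
    intro l ans hl hfuel
    have hlt : l + k < (cs.length : Int) := by omega
    simp only [pvLoopA]
    rw [if_pos hlt]
    rw [pvStep cs k l hw hk hl hlt]
    have hwlow : ∀ x ∈ PySem.List.slice cs (some (l + 1)) (some (l + 1 + k)), pvLower x :=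
      fun x hx => hw x (PySem.List.mem_of_mem_slice cs _ _ hx)
    have hlenw : ((PySem.List.slice cs (some (l + 1)) (some (l + 1 + k))).length : Int) = k := by
      rw [pvSlice_len cs (l + 1) (l + 1 + k) (by omega) (by omega) (by omega)]
      ring
    have hcond : (pvIsValid (pvCnt (PySem.List.slice cs (some (l + 1)) (some (l + 1 + k)))) = true) ↔
        (PySem.Set.len (PySem.Set.ofList (PySem.List.slice cs (some (l + 1)) (some (l + 1 + k)))) = k) := by
      rw [PySem.Set.len_eq, pvValid_cnt_iff _ hwlow]
      constructor
      · intro h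
        have := (pvSetLen_iff _).mpr h
        omega
      · intro h
        exact (pvSetLen_iff _).mp (by omega)
    rw [PySem.List.pyRange_one_cons (by omega), List.foldl_cons]
    rw [ih (l + 1) _ (by omega) (by omega)]
    congr 1
    rw [if_congr hcond rfl rfl]

-- ===== VERDICT (by name: the statement is the Claim_ definition above) =====
theorem subStringsKDist_spec : Claim_equal_subStringsKDist := by
  intro s k hdom hpre
  unfold Spec_subStringsKDist
  obtain ⟨hk, hcase⟩ := hpre
  simp only [subStringsKDist, subStringsKDist_alt]
  by_cases hnk : (s.toList.length : Int) < k
  · rw [if_pos hnk, PySem.List.pyRange_one_eq_nil (by omega)]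
    rfl
  · rw [if_neg hnk]
    have hw : ∀ x ∈ s.toList, pvLower x := by
      rcases hcase with h | h
      · exact absurd h hnk
      · intro x hx
        have hb := List.all_eq_true.mp h x hx
        simp only [Bool.and_eq_true, decide_eq_true_eq] at hb
        exact hb
    have hkn : k ≤ (s.toList.length : Int) := by omega
    rw [pvInit_fold s.toList hw k.toNat 0 k (List.replicate 26 0) (by simp) (by omega)
        le_rfl hk (by omega)]
    rw [show (PySem.List.slice s.toList (some 0) (some k)).foldl pvBumpC (List.replicate 26 0)
        = pvCnt (PySem.List.slice s.toList (some 0) (some k)) from rfl]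
    have hloop := pvLoop_eq s.toList k hw hk hkn (((s.toList.length : Int) - k).toNat) 0
      (if pvIsValid (pvCnt (PySem.List.slice s.toList (some 0) (some k))) then
        PySem.Set.add PySem.Set.empty (String.ofList (PySem.List.slice s.toList (some 0) (some k)))
      else PySem.Set.empty) le_rfl (by omega)
    rw [zero_add] at hloop
    rw [hloop]
    rw [PySem.List.pyRange_one_cons (show (0 : Int) < (s.toList.length : Int) - k + 1 by omega),
        List.foldl_cons]
    congr 1
    rw [zero_add]
    have hwlow : ∀ x ∈ PySem.List.slice s.toList (some 0) (some k), pvLower x :=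
      fun x hx => hw x (PySem.List.mem_of_mem_slice s.toList _ _ hx)
    have hlenw : ((PySem.List.slice s.toList (some 0) (some k)).length : Int) = k := by
      rw [pvSlice_len s.toList 0 k le_rfl hk hkn]
      ring
    have hcond : (pvIsValid (pvCnt (PySem.List.slice s.toList (some 0) (some k))) = true) ↔
        (PySem.Set.len (PySem.Set.ofList (PySem.List.slice s.toList (some 0) (some k))) = k) := by
      rw [PySem.Set.len_eq, pvValid_cnt_iff _ hwlow]
      constructor
      · intro h
        have := (pvSetLen_iff _).mpr h
        omega
      · intro h
        exact (pvSetLen_iff _).mp (by omega)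
    rw [if_congr hcond rfl rfl]
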